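-- pv_equiv track=rewrite | github.com/ksu-hmi/DriveGuard360 | stroke_check.py | check_stroke
-- ===== SOURCE A (Python) =====
-- def check_stroke(face_data):
--     count = 0
--     for state in face_data:
--         if state == "drooping":
--             count += 1
--             if count >= 2:
--                 return True
--         else:
--             count = 0
--     return False
-- ===== SOURCE B (Python) =====
-- def check_stroke(face_data):
--     idxs = [i for i, s in enumerate(face_data) if s == "drooping"]
--     return any(j - i == 1 for i, j in zip(idxs, idxs[1:]))
-- ===== Notes on version B (the rewrite author's own statement) =====
-- stated objective: alternative
-- what changed: Two staged passes instead of a stateful counter loop: first collect the indices of all 'drooping' states, then check whether any two consecutive collected indices differ by 1.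
import Mathlib
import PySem

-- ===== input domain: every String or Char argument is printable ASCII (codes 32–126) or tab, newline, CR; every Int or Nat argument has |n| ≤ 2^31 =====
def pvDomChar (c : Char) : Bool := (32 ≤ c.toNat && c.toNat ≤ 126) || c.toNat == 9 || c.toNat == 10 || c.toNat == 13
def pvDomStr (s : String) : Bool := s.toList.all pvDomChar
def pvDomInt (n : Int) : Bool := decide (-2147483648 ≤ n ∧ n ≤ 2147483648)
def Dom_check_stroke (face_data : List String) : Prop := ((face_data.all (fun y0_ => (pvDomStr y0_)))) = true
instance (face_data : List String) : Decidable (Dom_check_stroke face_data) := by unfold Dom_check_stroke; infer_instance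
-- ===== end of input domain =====

-- B replaces A's stateful run-counter loop by two staged passes: collect the indices of "drooping" states, then test whether any two consecutive collected indices are adjacent (objective: alternative).


-- ===== PORT A =====
-- loop with a run-length counter, early return once count >= 2
def checkStrokeGoA : List String → Nat → Bool
  | [], _ => false
  | state :: rest, count =>
    if state = "drooping" then
      if count + 1 ≥ 2 then true else checkStrokeGoA rest (count + 1)
    else
      checkStrokeGoA rest 0

def check_stroke (face_data : List String) : Bool := checkStrokeGoA face_data 0

-- ===== PORT B =====
-- pass 1: indices of "drooping" states (list comprehension over enumerate);
-- pass 2: any consecutive pair of indices differing by 1 (zip of idxs with idxs[1:])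
def check_stroke_alt (face_data : List String) : Bool :=
  let idxs : List Int :=
    ((PySem.List.enumerate face_data).filter (fun p => p.2 == "drooping")).map Prod.fst
  (idxs.zip (PySem.List.slice idxs (some 1) none)).any (fun p => p.2 - p.1 == 1)

-- ===== PRECONDITION & SPEC =====
def Spec_check_stroke (face_data : List String) (out : Bool) : Prop := out = check_stroke_alt face_data
instance (face_data : List String) (out : Bool) : Decidable (Spec_check_stroke face_data out) := by unfold Spec_check_stroke; infer_instance

-- ===== CLAIM (what is proved, stated in full; the proofs are below) =====
def Claim_equal_check_stroke : Prop := ∀ (face_data : List String), Dom_check_stroke face_data → Spec_check_stroke face_data (check_stroke face_data)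

-- ===== LEMMAS AND PROOFS =====

-- the "drooping" index list, in recursive form
def droopIdx : List String → Int → List Int
  | [], _ => []
  | s :: r, k => if s = "drooping" then k :: droopIdx r (k + 1) else droopIdx r (k + 1)

-- the adjacency test of B's second pass, on a bare list
def adjB (L : List Int) : Bool := (L.zip L.tail).any (fun p => p.2 - p.1 == 1)

theorem droopIdx_eq_filter (xs : List String) : ∀ (k : Int),
    ((PySem.List.enumerate xs k).filter (fun p => p.2 == "drooping")).map Prod.fst = droopIdx xs k := by
  induction xs with
  | nil => intro k; simp [PySem.List.enumerate_nil, droopIdx]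
  | cons s r ih =>
    intro k
    by_cases hs : s = "drooping" <;>
      simp [PySem.List.enumerate_cons, droopIdx, hs, ih]

theorem droopIdx_lb (xs : List String) : ∀ (k : Int), ∀ i ∈ droopIdx xs k, k ≤ i := by
  induction xs with
  | nil => intro k i h; simp [droopIdx] at h
  | cons s r ih =>
    intro k i h
    by_cases hs : s = "drooping" <;> simp [droopIdx, hs] at h
    · rcases h with h | h
      · omega
      · have := ih (k + 1) i h; omega
    · have := ih (k + 1) i h; omega

theorem adjB_cons_cons (a b : Int) (L : List Int) :
    adjB (a :: b :: L) = ((b - a == 1) || adjB (b :: L)) := by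
  simp [adjB, List.zip]

theorem adjB_cons_far (a : Int) (L : List Int) (h : ∀ i ∈ L, a + 2 ≤ i) :
    adjB (a :: L) = adjB L := by
  cases L with
  | nil => rfl
  | cons b L' =>
    rw [adjB_cons_cons]
    have hb : a + 2 ≤ b := h b (by simp)
    have : (b - a == 1) = false := by simp; omega
    simp [this]

theorem main_invariant (xs : List String) : ∀ (k : Int),
    checkStrokeGoA xs 0 = adjB (droopIdx xs k) ∧
    checkStrokeGoA xs 1 = adjB (k :: droopIdx xs (k + 1)) := by
  induction xs with
  | nil => intro k; constructor <;> simp [checkStrokeGoA, droopIdx, adjB]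
  | cons s r ih =>
    intro k
    by_cases hs : s = "drooping"
    · constructor
      · -- count 0, head drooping: recurse with count 1
        have h2 := (ih k).2
        simp [checkStrokeGoA, droopIdx, hs]
        exact h2
      · -- count 1, head drooping: A returns true; indices k, k+1 are adjacent
        simp [checkStrokeGoA, droopIdx, hs, adjB_cons_cons]
    · constructor
      · have h1 := (ih (k + 1)).1
        simp [checkStrokeGoA, droopIdx, hs]
        exact h1
      · -- count resets to 0; the phantom index k is at distance ≥ 2 from every collected index
        have h1 := (ih (k + 2)).1
        have hfar : adjB (k :: droopIdx r (k + 1 + 1)) = adjB (droopIdx r (k + 1 + 1)) := by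
          apply adjB_cons_far
          intro i hi
          have := droopIdx_lb r (k + 1 + 1) i hi
          omega
        simp [checkStrokeGoA, droopIdx, hs, hfar]
        rw [show k + 1 + 1 = k + 2 by ring]
        exact h1

-- ===== VERDICT (by name: the statement is the Claim_ definition above) =====
theorem check_stroke_spec : Claim_equal_check_stroke := by
  intro face_data _
  unfold Spec_check_stroke check_stroke
  simp only [check_stroke_alt, PySem.List.slice_from_one, droopIdx_eq_filter face_data 0]
  exact (main_invariant face_data 0).1
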